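-- pv_equiv track=rewrite | github.com/teamWSIZ/python1-2021 | zajecia12/z1.py | get_the_highest_number
-- ===== SOURCE A (Python) =====
-- from typing import List, Tuple
--
-- def get_the_highest_number(w: List[int]) -> Tuple[int, int]:
--     index = 0
--     max_ = w[index]
--
--     for i in range(1, len(w)):
--         if w[i] >= max_:
--             max_ = w[i]
--             index = i
--
--     return max_, index
-- ===== SOURCE B (Python) =====
-- from typing import List, Tuple
--
-- def get_the_highest_number(w: List[int]) -> Tuple[int, int]:
--     m = max(w)
--     return m, len(w) - 1 - w[::-1].index(m)
-- ===== Notes on version B (the rewrite author's own statement) =====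
-- stated objective: simpler
-- what changed: Replaces A's fused single pass that tracks the running maximum and its index inline with two differently-shaped passes: built-in max(w), then the last index located by a reverse-list index search.
-- outside the precondition, e.g. on get_the_highest_number([]): A raises IndexError, B raises ValueError
import Mathlib
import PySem

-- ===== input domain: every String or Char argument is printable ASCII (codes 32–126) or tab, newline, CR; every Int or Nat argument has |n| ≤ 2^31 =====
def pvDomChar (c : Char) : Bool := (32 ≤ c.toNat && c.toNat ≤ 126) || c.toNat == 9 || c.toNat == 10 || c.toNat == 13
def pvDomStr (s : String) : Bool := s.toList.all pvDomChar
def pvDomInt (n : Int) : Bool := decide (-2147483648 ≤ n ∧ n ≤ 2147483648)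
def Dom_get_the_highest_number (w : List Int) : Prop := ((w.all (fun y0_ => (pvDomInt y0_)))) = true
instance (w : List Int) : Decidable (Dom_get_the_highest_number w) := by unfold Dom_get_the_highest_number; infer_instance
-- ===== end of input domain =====

-- B computes max(w) with the built-in and finds the last index by a reverse search, replacing A's fused running-max loop; objective: simpler.


-- ===== PORT A =====
def get_the_highest_number (w : List Int) : Int × Int :=
  let max0 := PySem.List.pyGetD w 0 0
  (PySem.List.pyRange 1 (w.length : Int) 1).foldl
    (fun (s : Int × Int) i =>
      if s.1 ≤ PySem.List.pyGetD w i 0 then (PySem.List.pyGetD w i 0, i) else s)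
    (max0, 0)

-- ===== PORT B =====
def get_the_highest_number_alt (w : List Int) : Int × Int :=
  let m := (PySem.List.max? w (fun y => y)).getD 0
  let idx := (PySem.List.index? ((PySem.List.slice? w none none (-1)).getD []) m).getD 0
  (m, (w.length : Int) - 1 - (idx : Int))

-- ===== PRECONDITION & SPEC =====
-- Pre_ excludes exactly the empty list, on which Python A raises IndexError (w[0]); B raises ValueError (max([])) there.
def Pre_get_the_highest_number (w : List Int) : Prop := w ≠ []
instance (w : List Int) : Decidable (Pre_get_the_highest_number w) := by unfold Pre_get_the_highest_number; infer_instance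
def pvWitness_get_the_highest_number : List Int := [1, 3, 3, 0]
def Spec_get_the_highest_number (w : List Int) (out : Int × Int) : Prop := out = get_the_highest_number_alt w
instance (w : List Int) (out : Int × Int) : Decidable (Spec_get_the_highest_number w out) := by unfold Spec_get_the_highest_number; infer_instance

-- ===== CLAIM (what is proved, stated in full; the proofs are below) =====
def Claim_equal_get_the_highest_number : Prop := ∀ (w : List Int), Dom_get_the_highest_number w → Pre_get_the_highest_number w → Spec_get_the_highest_number w (get_the_highest_number w)

-- ===== LEMMAS AND PROOFS =====

-- A on a snoc: one more iteration of the running-max loop, at index l.length.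
theorem A_snoc (x : Int) (t : List Int) (a : Int) :
    get_the_highest_number ((x :: t) ++ [a]) =
      (if (get_the_highest_number (x :: t)).1 ≤ a then (a, ((x :: t).length : Int))
       else get_the_highest_number (x :: t)) := by
  unfold get_the_highest_number
  have hlen : (((x :: t) ++ [a]).length : Int) = ((x :: t).length : Int) + 1 := by
    simp
  rw [hlen, PySem.List.pyRange_one_succ_right (by simp), List.foldl_append]
  have hget : ∀ (s : Int × Int), ∀ i ∈ PySem.List.pyRange 1 ((x :: t).length : Int) 1,
      (if s.1 ≤ PySem.List.pyGetD ((x :: t) ++ [a]) i 0 then (PySem.List.pyGetD ((x :: t) ++ [a]) i 0, i) else s)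
      = (if s.1 ≤ PySem.List.pyGetD (x :: t) i 0 then (PySem.List.pyGetD (x :: t) i 0, i) else s) := by
    intro s i hi
    rw [PySem.List.mem_pyRange_one] at hi
    obtain ⟨h1, h2⟩ := hi
    have h2' : i < (((x :: t) ++ [a]).length : Int) := by
      simp only [List.length_append, List.length_cons, List.length_nil, Nat.cast_add,
        Nat.cast_one] at h2 ⊢
      omega
    rw [PySem.List.pyGetD_eq_getElem _ _ (by omega) h2',
        PySem.List.pyGetD_eq_getElem _ _ (by omega) h2,
        List.getElem_append_left]
  rw [PySem.List.foldl_congr_mem _ _ _ _ hget]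
  have hlast : PySem.List.pyGetD ((x :: t) ++ [a]) ((x :: t).length : Int) 0 = a := by
    rw [PySem.List.pyGetD_eq_getElem _ _ (by omega) (by simp)]
    simp
  simp only [List.foldl_cons, List.foldl_nil, List.cons_append] at hlast ⊢
  rw [hlast]
  simp only [PySem.List.pyGetD_zero_cons]

-- B on a snoc takes the same step: the new maximum is max(old, a); if a wins (ties
-- included) the reverse search finds it at distance 0, else the old index survives.
theorem B_snoc (x : Int) (t : List Int) (a : Int) :
    get_the_highest_number_alt ((x :: t) ++ [a]) =
      (if (get_the_highest_number_alt (x :: t)).1 ≤ a then (a, ((x :: t).length : Int))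
       else get_the_highest_number_alt (x :: t)) := by
  unfold get_the_highest_number_alt
  simp only [PySem.List.slice?_none_none_neg_one, Option.getD_some]
  have hmax : PySem.List.max? ((x :: t) ++ [a]) (fun y => y)
      = some (max (t.foldl max x) a) := by
    rw [List.cons_append, PySem.List.max?_id_cons, List.foldl_append]
    simp
  have hmaxl : PySem.List.max? (x :: t) (fun y => y) = some (t.foldl max x) := by
    rw [PySem.List.max?_id_cons]
  have hrev : ((x :: t) ++ [a]).reverse = a :: (x :: t).reverse := by simp
  rw [hmax, hmaxl, hrev]
  simp only [Option.getD_some]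
  by_cases hMa : t.foldl max x ≤ a
  · rw [max_eq_right hMa]
    rw [PySem.List.index?_cons_self]
    simp only [Option.getD_some, if_pos hMa]
    simp
  · rw [max_eq_left (not_le.mp hMa).le]
    have hne : a ≠ t.foldl max x := by
      intro h; exact hMa (le_of_eq h.symm)
    rw [PySem.List.index?_cons_of_ne _ hne]
    have hmem : t.foldl max x ∈ (x :: t).reverse := by
      rw [List.mem_reverse]
      exact PySem.List.max?_mem hmaxl
    obtain ⟨k, hk⟩ := Option.isSome_iff_exists.mp
      ((PySem.List.index?_isSome_iff _ _).mpr hmem)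
    rw [hk]
    simp only [Option.map_some, Option.getD_some, if_neg hMa]
    have : (((x :: t) ++ [a]).length : Int) - 1 - ((k + 1 : Nat) : Int)
        = ((x :: t).length : Int) - 1 - (k : Int) := by
      simp only [List.length_append, List.length_cons, List.length_nil]
      push_cast
      ring
    rw [this]

theorem main_eq (w : List Int) (hw : w ≠ []) :
    get_the_highest_number w = get_the_highest_number_alt w := by
  induction w using List.reverseRecOn with
  | nil => exact absurd rfl hw
  | append_singleton l a ih =>
    cases l with
    | nil =>
      simp [get_the_highest_number, get_the_highest_number_alt,
        PySem.List.slice?_none_none_neg_one, PySem.List.pyRange_one_eq_nil,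
        PySem.List.pyGetD, PySem.List.index?, PySem.List.max?]
    | cons x t =>
      rw [A_snoc, B_snoc, ih (List.cons_ne_nil x t)]

-- ===== VERDICT (by name: the statement is the Claim_ definition above) =====
theorem get_the_highest_number_spec : Claim_equal_get_the_highest_number := by
  intro w _ hpre
  unfold Spec_get_the_highest_number
  exact main_eq w hpre
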